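-- pv_equiv track=rewrite | github.com/jayictw/spidererp | scripts/vendor_platform_price_collect.py | choose_column
-- ===== SOURCE A (Python) =====
-- def choose_column(headers: list[str], keywords: list[str]) -> str | None:
--     scored: list[tuple[int, str]] = []
--     for h in headers:
--         hl = (h or "").lower()
--         score = 0
--         for kw in keywords:
--             if kw.lower() in hl:
--                 score += len(kw)
--         if score > 0:
--             scored.append((score, h))
--     if not scored:
--         return None
--     scored.sort(reverse=True)
--     return scored[0][1]
-- ===== SOURCE B (Python) =====
-- def choose_column(headers: list[str], keywords: list[str]) -> str | None:
--     best = None  # running best (score, header) under tuple order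
--     for h in headers:
--         hl = h.lower()
--         score = 0
--         for kw in keywords:
--             if kw.lower() in hl:
--                 score += len(kw)
--         if score > 0 and (best is None or (score, h) > best):
--             best = (score, h)
--     return None if best is None else best[1]
-- ===== Notes on version B (the rewrite author's own statement) =====
-- stated objective: alternative
-- what changed: B replaces A's collect-all-positive-(score,header)-tuples-then-reverse-sort-and-take-first strategy by a single pass that maintains one running-best (score, header) tuple under Python's tuple order (strict > keeps the first maximal element, matching A's stable reverse sort).
import Mathlib
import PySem

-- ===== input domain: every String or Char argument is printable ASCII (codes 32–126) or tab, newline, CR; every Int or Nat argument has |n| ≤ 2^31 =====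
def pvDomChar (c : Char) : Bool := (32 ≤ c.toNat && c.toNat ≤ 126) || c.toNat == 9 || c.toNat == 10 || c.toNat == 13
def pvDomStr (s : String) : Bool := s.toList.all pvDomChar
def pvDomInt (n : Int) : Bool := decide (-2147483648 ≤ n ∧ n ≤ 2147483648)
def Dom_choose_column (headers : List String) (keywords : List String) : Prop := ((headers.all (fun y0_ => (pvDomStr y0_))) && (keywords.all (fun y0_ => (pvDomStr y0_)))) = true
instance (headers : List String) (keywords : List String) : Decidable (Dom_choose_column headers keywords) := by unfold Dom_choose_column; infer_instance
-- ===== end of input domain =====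

-- B replaces A's collect-all-then-reverse-sort by a single running-best (score, header)
-- tuple maintained in one pass (alternative decomposition; same O(H·K) scoring cost).

-- ===== PORT A =====
-- A: collect (score, h) for every positive-scoring header, sort descending, take first.
def choose_column (headers : List String) (keywords : List String) : Option String :=
  let scored : List (Int × String) := headers.foldl (fun acc h =>
    let hl := PySem.Str.lower (if h = "" then "" else h)   -- (h or "").lower()
    let score : Int := keywords.foldl (fun s kw =>
      if PySem.Str.isIn (PySem.Str.lower kw) hl then s + PySem.Str.len kw else s) 0
    if 0 < score then acc ++ [(score, h)] else acc) []
  if scored = [] then none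
  else ((PySem.List.sorted2 scored (fun p => p.1) (fun p => p.2) true).head?).map (fun p => p.2)

-- ===== PORT B =====
-- B: one pass; best is the running maximal (score, header) tuple under Python's tuple order.
def choose_column_alt (headers : List String) (keywords : List String) : Option String :=
  let best : Option (Int × String) := headers.foldl (fun best h =>
    let hl := PySem.Str.lower h
    let score : Int := keywords.foldl (fun s kw =>
      if PySem.Str.isIn (PySem.Str.lower kw) hl then s + PySem.Str.len kw else s) 0
    if 0 < score then
      match best with
      | none => some (score, h)
      | some b => if b.1 < score ∨ (b.1 = score ∧ b.2 < h) then some (score, h) else best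
    else best) none
  best.map (fun p => p.2)

-- ===== PRECONDITION & SPEC =====
def Spec_choose_column (headers : List String) (keywords : List String) (out : Option String) : Prop := out = choose_column_alt headers keywords
instance (headers : List String) (keywords : List String) (out : Option String) : Decidable (Spec_choose_column headers keywords out) := by unfold Spec_choose_column; infer_instance

-- ===== CLAIM (what is proved, stated in full; the proofs are below) =====
def Claim_equal_choose_column : Prop := ∀ (headers : List String) (keywords : List String), Dom_choose_column headers keywords → Spec_choose_column headers keywords (choose_column headers keywords)

-- ===== LEMMAS AND PROOFS =====

-- the reverse-sort comparison used by sorted2 with keys fst/snd, reverse=true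
def pvBefore (x m : Int × String) : Bool :=
  decide (m.1 < x.1) || (!decide (x.1 < m.1) && decide (m.2 < x.2))

-- the running-max step it induces on an Option accumulator
def pvStep (o : Option (Int × String)) (x : Int × String) : Option (Int × String) :=
  match o with
  | none => some x
  | some m => some (if pvBefore x m then x else m)

lemma pv_head?_insertBy (before : (Int × String) → (Int × String) → Bool)
    (x : Int × String) (acc : List (Int × String)) :
    (PySem.List.insertBy before x acc).head? =
      some (match acc with | [] => x | y :: _ => if before x y then x else y) := by
  cases acc with
  | nil => simp [PySem.List.insertBy]
  | cons y ys => simp [PySem.List.insertBy]; split <;> simp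

lemma pv_head?_foldl_insertBy (before : (Int × String) → (Int × String) → Bool)
    (xs : List (Int × String)) (acc : List (Int × String)) :
    (xs.foldl (fun a x => PySem.List.insertBy before x a) acc).head? =
      xs.foldl (fun o x => match o with
        | none => some x
        | some m => some (if before x m then x else m)) acc.head? := by
  induction xs generalizing acc with
  | nil => rfl
  | cons x xs ih =>
      simp only [List.foldl_cons]
      rw [ih, pv_head?_insertBy]
      cases acc <;> rfl

lemma pv_filter_map_foldl {α : Type} (c : α → Bool) (f : α → Int × String)
    (xs : List α) (o : Option (Int × String)) :
    ((xs.filter c).map f).foldl pvStep o =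
      xs.foldl (fun o h => if c h then pvStep o (f h) else o) o := by
  induction xs generalizing o with
  | nil => rfl
  | cons x xs ih =>
      by_cases hc : c x = true
      · simp [hc, ih]
      · simp [hc, ih]

-- B's lexicographic condition agrees with pvBefore
lemma pv_cond_eq (b : Int × String) (s : Int) (h : String) :
    (b.1 < s ∨ (b.1 = s ∧ b.2 < h)) ↔ pvBefore (s, h) b = true := by
  unfold pvBefore
  simp only [decide_eq_true_eq, Bool.or_eq_true, Bool.and_eq_true, Bool.not_eq_true',
    decide_eq_false_iff_not]
  constructor
  · rintro (h1 | ⟨h1, h2⟩)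
    · exact Or.inl h1
    · exact Or.inr ⟨by omega, h2⟩
  · rintro (h1 | ⟨h1, h2⟩)
    · exact Or.inl h1
    · by_cases he : b.1 < s
      · exact Or.inl he
      · exact Or.inr ⟨by omega, h2⟩

theorem choose_column_spec : Claim_equal_choose_column := by
  intro headers keywords _
  unfold Spec_choose_column choose_column choose_column_alt
  -- normalise A's (h or "").lower() to h.lower()
  have hor : ∀ h : String, (if h = "" then "" else h) = h := by
    intro h; split <;> simp_all
  simp only [hor]
  set score : String → Int := fun h => keywords.foldl (fun s kw =>
      if PySem.Str.isIn (PySem.Str.lower kw) (PySem.Str.lower h) then s + PySem.Str.len kw else s) 0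
    with hscore
  -- A's scored list as filter-then-map
  have hsc : headers.foldl (fun acc h =>
        if 0 < score h then acc ++ [(score h, h)] else acc) ([] : List (Int × String))
      = ((headers.filter (fun h => decide (0 < score h))).map (fun h => (score h, h))) := by
    have := PySem.List.foldl_append_if (fun h => decide (0 < score h))
      (fun h => (score h, h)) headers []
    simpa using this
  -- B's fold is the pvStep fold over the same filtered list
  have hb : headers.foldl (fun best h =>
        if 0 < score h then
          match best with
          | none => some (score h, h)
          | some b => if b.1 < score h ∨ (b.1 = score h ∧ b.2 < h) then some (score h, h) else best
        else best) (none : Option (Int × String))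
      = ((headers.filter (fun h => decide (0 < score h))).map (fun h => (score h, h))).foldl pvStep none := by
    rw [pv_filter_map_foldl]
    apply PySem.List.foldl_congr_mem
    intro o h _
    by_cases hs : 0 < score h
    · cases o with
      | none => rw [if_pos hs]; simp [hs, pvStep]
      | some b =>
          by_cases hlex : b.1 < score h ∨ (b.1 = score h ∧ b.2 < h)
          · have hpb := (pv_cond_eq b (score h) h).mp hlex
            rw [if_pos hs]; dsimp only; rw [if_pos hlex]
            simp [hs, pvStep, hpb]
          · have hpb : pvBefore (score h, h) b = false := by
              cases hpb : pvBefore (score h, h) b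
              · rfl
              · exact absurd ((pv_cond_eq b (score h) h).mpr hpb) hlex
            rw [if_pos hs]; dsimp only; rw [if_neg hlex]
            simp [hs, pvStep, hpb]
    · rw [if_neg hs]; simp [hs]
  rw [hb, ← hsc]
  set scored := headers.foldl (fun acc h =>
      if 0 < score h then acc ++ [(score h, h)] else acc) ([] : List (Int × String)) with hscd
  -- head of A's reverse sort = the pvStep fold
  have hhead : (PySem.List.sorted2 scored (fun p => p.1) (fun p => p.2) true).head?
      = scored.foldl pvStep none := by
    show (scored.foldl (fun a x => PySem.List.insertBy _ x a) []).head? = _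
    rw [pv_head?_foldl_insertBy]
    rfl
  by_cases hnil : scored = []
  · simp [hnil]
  · rw [if_neg hnil, hhead]
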